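-- pv_equiv track=rewrite | github.com/mtthsnc/jobcoach | apps/api-gateway/api_gateway/app.py | _normalize_negotiation_evidence_links
-- ===== SOURCE A (Python) =====
-- from typing import Any
--
-- def _normalize_negotiation_evidence_links(raw_links: Any) -> list[dict[str, str]]:
--     if not isinstance(raw_links, list):
--         return [
--             {
--                 "source_type": "offer_input",
--                 "source_id": "candidate",
--                 "detail": "Fallback offer context used for negotiation evidence.",
--             }
--         ]
--
--     order = {
--         "offer_input": 0,
--         "candidate_profile": 1,
--         "interview_session": 2,
--         "feedback_report": 3,
--         "trajectory_plan": 4,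
--     }
--     dedup: dict[tuple[str, str, str], dict[str, str]] = {}
--     for raw in raw_links:
--         if not isinstance(raw, dict):
--             continue
--         source_type = str(raw.get("source_type", "")).strip()
--         source_id = str(raw.get("source_id", "")).strip()
--         detail = str(raw.get("detail", "")).strip()
--         if not source_type or not source_id or not detail:
--             continue
--         dedup[(source_type, source_id, detail)] = {
--             "source_type": source_type,
--             "source_id": source_id,
--             "detail": detail,
--         }
--
--     normalized = sorted(
--         dedup.values(),
--         key=lambda item: (
--             order.get(str(item["source_type"]), 99),
--             str(item["source_id"]),
--             str(item["detail"]),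
--         ),
--     )
--     return normalized[:5] if normalized else _normalize_negotiation_evidence_links(None)
-- ===== SOURCE B (Python) =====
-- from typing import Any
--
-- _CATS = [
--     "offer_input",
--     "candidate_profile",
--     "interview_session",
--     "feedback_report",
--     "trajectory_plan",
-- ]
--
-- _FALLBACK = {
--     "source_type": "offer_input",
--     "source_id": "candidate",
--     "detail": "Fallback offer context used for negotiation evidence.",
-- }
--
--
-- def _cat_index(source_type: str) -> int:
--     return _CATS.index(source_type) if source_type in _CATS else len(_CATS)
--
--
-- def _normalize_negotiation_evidence_links(raw_links: Any) -> list[dict[str, str]]: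
--     if not isinstance(raw_links, list):
--         return [dict(_FALLBACK)]
--
--     dedup: dict[tuple[str, str, str], dict[str, str]] = {}
--     for raw in raw_links:
--         if not isinstance(raw, dict):
--             continue
--         source_type = str(raw.get("source_type", "")).strip()
--         source_id = str(raw.get("source_id", "")).strip()
--         detail = str(raw.get("detail", "")).strip()
--         if not source_type or not source_id or not detail:
--             continue
--         dedup[(source_type, source_id, detail)] = {
--             "source_type": source_type,
--             "source_id": source_id,
--             "detail": detail,
--         }
--
--     out: list[dict[str, str]] = []
--     for ci in range(len(_CATS) + 1):
--         bucket = [it for it in dedup.values() if _cat_index(it["source_type"]) == ci]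
--         bucket.sort(key=lambda it: (it["source_id"], it["detail"]))
--         out += bucket
--     return out[:5] if out else [dict(_FALLBACK)]
-- ===== Notes on version B (the rewrite author's own statement) =====
-- stated objective: alternative
-- what changed: Replaces the single stable sort with a composite (category-rank, source_id, detail) key by a bucket decomposition: after the same dedup pass, items are grouped by the fixed category order (unknown types in a last bucket), each bucket is sorted by (source_id, detail) alone, and the buckets are concatenated in category order before taking the top 5.
import Mathlib
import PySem

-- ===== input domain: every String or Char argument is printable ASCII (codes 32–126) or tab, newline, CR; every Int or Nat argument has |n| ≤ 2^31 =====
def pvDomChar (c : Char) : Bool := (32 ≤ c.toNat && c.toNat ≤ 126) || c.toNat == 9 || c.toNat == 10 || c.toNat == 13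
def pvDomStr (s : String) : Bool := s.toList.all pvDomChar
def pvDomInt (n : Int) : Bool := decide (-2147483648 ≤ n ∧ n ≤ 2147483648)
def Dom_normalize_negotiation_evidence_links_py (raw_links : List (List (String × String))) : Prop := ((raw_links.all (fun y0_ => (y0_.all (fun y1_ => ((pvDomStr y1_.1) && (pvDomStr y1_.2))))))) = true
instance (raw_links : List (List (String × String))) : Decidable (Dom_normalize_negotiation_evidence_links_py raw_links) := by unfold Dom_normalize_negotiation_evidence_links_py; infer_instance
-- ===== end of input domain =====

-- B replaces A's single stable sort by a composite 3-tuple key with a bucket-per-category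
-- decomposition (filter each category in order, sort each bucket by (source_id, detail), concatenate);
-- same dedup pass and the same fallback list — an alternative decomposition, not claimed faster.

-- ===== PORT A =====
-- Python string comparison in sort keys is taken on .toList (code points): PySem's stated
-- representation of str '<' ("Python's s < t on str IS Lean's '<' on s.toList").

-- the literal list A's recursive call _normalize_negotiation_evidence_links(None) returns at once
def pvFallback : List (List (String × String)) :=
  [[("source_type", "offer_input"), ("source_id", "candidate"),
    ("detail", "Fallback offer context used for negotiation evidence.")]]

def pvOrder : PySem.Dict String Int :=
  PySem.Dict.ofList [("offer_input", 0), ("candidate_profile", 1), ("interview_session", 2),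
    ("feedback_report", 3), ("trajectory_plan", 4)]

-- raw.get(k, "") on an incoming JSON object (an association list)
def pvGetStr (raw : List (String × String)) (k : String) : String :=
  (PySem.Dict.ofList raw).getD k ""

-- str(item[k]) on the normalized items built by the dedup loop: the key is always present on
-- those items, so the "" default is never reached (Python would raise KeyError there)
def pvItemGet (item : List (String × String)) (k : String) : String :=
  ((PySem.Dict.mk item).get? k).getD ""

-- the dedup loop; Source A and Source B contain this identical pass verbatim, transliterated once
def pvDedup (raw_links : List (List (String × String))) :
    PySem.Dict (String × String × String) (List (String × String)) :=
  raw_links.foldl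
    (fun dedup raw =>
      let source_type := PySem.Str.strip (pvGetStr raw "source_type")
      let source_id := PySem.Str.strip (pvGetStr raw "source_id")
      let detail := PySem.Str.strip (pvGetStr raw "detail")
      if source_type = "" ∨ source_id = "" ∨ detail = "" then dedup
      else dedup.insert (source_type, source_id, detail)
        [("source_type", source_type), ("source_id", source_id), ("detail", detail)])
    PySem.Dict.empty

-- A's sort key: the tuple (order.get(str(item["source_type"]), 99), source_id, detail),
-- compared lexicographically as in Python (Lex product)
def pvKeyA (item : List (String × String)) : Int ×ₗ List Char ×ₗ List Char :=
  toLex (pvOrder.getD (pvItemGet item "source_type") 99,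
    toLex ((pvItemGet item "source_id").toList, (pvItemGet item "detail").toList))

def normalize_negotiation_evidence_links_py (raw_links : List (List (String × String))) :
    List (List (String × String)) :=
  -- isinstance(raw_links, list) holds for every input of this type
  let normalized := PySem.List.sorted (pvDedup raw_links).values pvKeyA
  if normalized ≠ [] then PySem.List.slice normalized none (some 5) else pvFallback

-- ===== PORT B =====
def pvCats : List String :=
  ["offer_input", "candidate_profile", "interview_session", "feedback_report", "trajectory_plan"]

-- _CATS.index(source_type) if source_type in _CATS else len(_CATS)
-- (.index is guarded by the membership test, so the 0 default of getD is never reached)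
def pvCatIndex (source_type : String) : Int :=
  if source_type ∈ pvCats then (((PySem.List.index? pvCats source_type).getD 0 : Nat) : Int)
  else (pvCats.length : Int)

def normalize_negotiation_evidence_links_py_alt (raw_links : List (List (String × String))) :
    List (List (String × String)) :=
  let dedup := pvDedup raw_links   -- Source B repeats A's dedup pass verbatim
  let out := (PySem.List.pyRange 0 ((pvCats.length : Int) + 1) 1).foldl
    (fun out ci =>
      out ++ PySem.List.sorted2
        (dedup.values.filter (fun it => pvCatIndex (pvItemGet it "source_type") == ci))
        (fun it => (pvItemGet it "source_id").toList) (fun it => (pvItemGet it "detail").toList))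
    []
  if out ≠ [] then PySem.List.slice out none (some 5) else pvFallback

-- ===== PRECONDITION & SPEC =====
def Spec_normalize_negotiation_evidence_links_py (raw_links : List (List (String × String))) (out : List (List (String × String))) : Prop := out = normalize_negotiation_evidence_links_py_alt raw_links
instance (raw_links : List (List (String × String))) (out : List (List (String × String))) : Decidable (Spec_normalize_negotiation_evidence_links_py raw_links out) := by unfold Spec_normalize_negotiation_evidence_links_py; infer_instance

-- ===== CLAIM (what is proved, stated in full; the proofs are below) =====
def Claim_equal_normalize_negotiation_evidence_links_py : Prop := ∀ (raw_links : List (List (String × String))), Dom_normalize_negotiation_evidence_links_py raw_links → Spec_normalize_negotiation_evidence_links_py raw_links (normalize_negotiation_evidence_links_py raw_links)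

-- ===== LEMMAS AND PROOFS =====

-- proof-side abbreviations
def pvSt (it : List (String × String)) : String := pvItemGet it "source_type"
def pvSid (it : List (String × String)) : List Char := (pvItemGet it "source_id").toList
def pvDet (it : List (String × String)) : List Char := (pvItemGet it "detail").toList
def pvCat (it : List (String × String)) : Int := pvOrder.getD (pvSt it) 99
def pvIdx (it : List (String × String)) : Int := pvCatIndex (pvSt it)
def pvCatVal (i : Int) : Int := if i = 5 then 99 else i

-- the comparison sorted uses for A's key
def pvLtA (a b : List (String × String)) : Bool := decide (pvKeyA a < pvKeyA b)
-- the comparison sorted2 uses for B's (source_id, detail) key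
def pvLt2 (a b : List (String × String)) : Bool :=
  decide (pvSid a < pvSid b) || (!decide (pvSid b < pvSid a) && decide (pvDet a < pvDet b))

-- one bucket of B
def pvF (vals : List (List (String × String))) (ci : Int) : List (List (String × String)) :=
  PySem.List.sorted2 (vals.filter (fun it => pvCatIndex (pvItemGet it "source_type") == ci))
    (fun it => (pvItemGet it "source_id").toList) (fun it => (pvItemGet it "detail").toList)

lemma pvCat_spec (s : String) :
    (0 ≤ pvCatIndex s ∧ pvCatIndex s ≤ 5) ∧ pvOrder.getD s 99 = pvCatVal (pvCatIndex s) := by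
  by_cases hm : s ∈ pvCats
  · simp only [pvCats, List.mem_cons, List.not_mem_nil, or_false] at hm
    rcases hm with rfl | rfl | rfl | rfl | rfl <;> decide
  · have hidx : pvCatIndex s = 5 := by
      simp only [pvCatIndex, if_neg hm]
      decide
    have hkeys : pvOrder.keys = pvCats := by decide
    have hc : pvOrder.contains s = false := by
      rw [PySem.Dict.contains_eq_decide_mem_keys, hkeys]
      simp [hm]
    rw [PySem.Dict.getD_of_not_contains _ _ hc, hidx]
    decide

lemma pvCat_lt_of_idx_lt {x y : List (String × String)} (h : pvIdx x < pvIdx y) :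
    pvCat x < pvCat y := by
  have hx := pvCat_spec (pvSt x)
  have hy := pvCat_spec (pvSt y)
  simp only [pvCat, pvIdx] at *
  rw [hx.2, hy.2]
  simp only [pvCatVal] at *
  split_ifs <;> omega

lemma pvCat_eq_of_idx_eq {x y : List (String × String)} (h : pvIdx x = pvIdx y) :
    pvCat x = pvCat y := by
  have hx := (pvCat_spec (pvSt x)).2
  have hy := (pvCat_spec (pvSt y)).2
  simp only [pvCat, pvIdx] at *
  rw [hx, hy, h]

lemma insertBy_append_left {α : Type} (before : α → α → Bool) (x : α) (l1 l2 : List α)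
    (h : ∀ y ∈ l1, before x y = false) :
    PySem.List.insertBy before x (l1 ++ l2) = l1 ++ PySem.List.insertBy before x l2 := by
  induction l1 with
  | nil => rfl
  | cons a l1 ih =>
      have ha : before x a = false := h a (by simp)
      simp only [List.cons_append, PySem.List.insertBy, ha, Bool.false_eq_true, if_false]
      rw [ih (fun y hy => h y (by simp [hy]))]

lemma insertBy_append_right {α : Type} (before : α → α → Bool) (x : α) (l1 l2 : List α)
    (h : ∀ y ∈ l2, before x y = true) :
    PySem.List.insertBy before x (l1 ++ l2) = PySem.List.insertBy before x l1 ++ l2 := by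
  induction l1 with
  | nil =>
      cases l2 with
      | nil => rfl
      | cons b l2 =>
          have hb : before x b = true := h b (by simp)
          simp [PySem.List.insertBy, hb]
  | cons a l1 ih =>
      by_cases ha : before x a = true
      · simp [PySem.List.insertBy, ha]
      · simp only [Bool.not_eq_true] at ha
        simp only [List.cons_append, PySem.List.insertBy, ha, Bool.false_eq_true, if_false]
        rw [ih]

lemma insertBy_congr {α : Type} (before before' : α → α → Bool) (x : α) (l : List α)
    (h : ∀ y ∈ l, before x y = before' x y) :
    PySem.List.insertBy before x l = PySem.List.insertBy before' x l := by
  induction l with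
  | nil => rfl
  | cons a l ih =>
      have ha := h a (by simp)
      simp only [PySem.List.insertBy, ha]
      rw [ih (fun y hy => h y (by simp [hy]))]

lemma pvKeyA_eq (it : List (String × String)) :
    pvKeyA it = toLex (pvCat it, toLex (pvSid it, pvDet it)) := rfl

lemma pvLtA_false_of_cat_lt {x y : List (String × String)} (h : pvCat y < pvCat x) :
    pvLtA x y = false := by
  simp only [pvLtA, pvKeyA_eq, decide_eq_false_iff_not, Prod.Lex.toLex_lt_toLex]
  push Not
  exact ⟨by omega, fun he => absurd he (by omega)⟩

lemma pvLtA_true_of_cat_lt {x y : List (String × String)} (h : pvCat x < pvCat y) :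
    pvLtA x y = true := by
  simp only [pvLtA, pvKeyA_eq, decide_eq_true_eq, Prod.Lex.toLex_lt_toLex]
  exact Or.inl h

lemma pvLtA_eq_pvLt2_of_cat_eq {x y : List (String × String)} (h : pvCat x = pvCat y) :
    pvLtA x y = pvLt2 x y := by
  simp only [pvLtA, pvLt2, pvKeyA_eq, Prod.Lex.toLex_lt_toLex, h, lt_irrefl,
    false_or, true_and]
  rcases lt_trichotomy (pvSid x) (pvSid y) with h1 | h1 | h1
  · simp [h1]
  · simp [h1]
  · have hns : ¬ pvSid x < pvSid y := lt_asymm h1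
    have hne : pvSid x ≠ pvSid y := fun he => absurd he.symm (ne_of_lt h1)
    simp [h1, hns, hne]

lemma sorted_append_singleton {α κ : Type} [LT κ] [DecidableLT κ] (l : List α) (v : α) (key : α → κ) :
    PySem.List.sorted (l ++ [v]) key
      = PySem.List.insertBy (fun a b => decide (key a < key b)) v (PySem.List.sorted l key) := by
  rw [PySem.List.sorted_eq_foldl_insertBy, PySem.List.sorted_eq_foldl_insertBy, List.foldl_append]
  rfl

lemma sorted2_append_singleton {α κ₁ κ₂ : Type} [LT κ₁] [DecidableLT κ₁] [LT κ₂] [DecidableLT κ₂]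
    (l : List α) (v : α) (k1 : α → κ₁) (k2 : α → κ₂) :
    PySem.List.sorted2 (l ++ [v]) k1 k2
      = PySem.List.insertBy
          (fun a b => decide (k1 a < k1 b) || (!decide (k1 b < k1 a) && decide (k2 a < k2 b)))
          v (PySem.List.sorted2 l k1 k2) := by
  simp only [PySem.List.sorted2, List.foldl_append]
  rfl

lemma flatMap_congr_mem {α β : Type} (cs : List α) (f g : α → List β)
    (h : ∀ c ∈ cs, f c = g c) : cs.flatMap f = cs.flatMap g := by
  induction cs with
  | nil => rfl
  | cons a cs ih =>
      simp only [List.flatMap_cons]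
      rw [h a (by simp), ih (fun c hc => h c (by simp [hc]))]

lemma insertBy_flatMap (v : List (String × String)) (cs : List Int)
    (G : Int → List (List (String × String)))
    (hG : ∀ c ∈ cs, ∀ y ∈ G c, pvIdx y = c)
    (hnd : cs.Pairwise (· < ·)) (hv : pvIdx v ∈ cs) :
    PySem.List.insertBy pvLtA v (cs.flatMap G)
      = cs.flatMap (fun c => if c = pvIdx v then PySem.List.insertBy pvLt2 v (G c) else G c) := by
  induction cs with
  | nil => cases hv
  | cons c cs ih =>
      simp only [List.flatMap_cons]
      by_cases hc : pvIdx v = c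
      · rw [insertBy_append_right _ _ _ _ (fun y hy => by
          rcases List.mem_flatMap.1 hy with ⟨c', hc', hy'⟩
          have h1 : pvIdx y = c' := hG c' (by simp [hc']) y hy'
          have h2 : c < c' := (List.pairwise_cons.1 hnd).1 c' hc'
          exact pvLtA_true_of_cat_lt (pvCat_lt_of_idx_lt (by omega)))]
        rw [insertBy_congr _ pvLt2 _ _ (fun y hy => by
          have h1 : pvIdx y = c := hG c (by simp) y hy
          exact pvLtA_eq_pvLt2_of_cat_eq (pvCat_eq_of_idx_eq (by omega)))]
        rw [if_pos hc.symm]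
        congr 1
        apply flatMap_congr_mem
        intro c' hc'
        have h2 : c < c' := (List.pairwise_cons.1 hnd).1 c' hc'
        rw [if_neg (by omega)]
      · have hv' : pvIdx v ∈ cs := by
          rcases List.mem_cons.1 hv with h' | h'
          · exact absurd h' hc
          · exact h'
        rw [insertBy_append_left _ _ _ _ (fun y hy => by
          have h1 : pvIdx y = c := hG c (by simp) y hy
          have h2 : c < pvIdx v := (List.pairwise_cons.1 hnd).1 _ hv'
          exact pvLtA_false_of_cat_lt (pvCat_lt_of_idx_lt (by omega)))]
        rw [ih (fun c' hc' y hy => hG c' (by simp [hc']) y hy)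
          (List.pairwise_cons.1 hnd).2 hv']
        rw [if_neg (fun he => hc he.symm)]

lemma pvF_append (vs : List (List (String × String))) (v : List (String × String)) (c : Int) :
    pvF (vs ++ [v]) c
      = if c = pvIdx v then PySem.List.insertBy pvLt2 v (pvF vs c) else pvF vs c := by
  unfold pvF
  rw [List.filter_append]
  by_cases hc : c = pvIdx v
  · have hf : List.filter (fun it => pvCatIndex (pvItemGet it "source_type") == c) [v] = [v] := by
      simp [List.filter, hc, pvIdx, pvSt]
    rw [hf, if_pos hc, sorted2_append_singleton]
    rfl
  · have hf : List.filter (fun it => pvCatIndex (pvItemGet it "source_type") == c) [v] = [] := by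
      simp only [List.filter_cons, List.filter_nil]
      rw [if_neg]
      simp only [beq_iff_eq]
      exact fun he => hc he.symm
    rw [hf, List.append_nil, if_neg hc]

lemma mem_pvF {y : List (String × String)} {vals : List (List (String × String))} {c : Int}
    (h : y ∈ pvF vals c) : pvIdx y = c := by
  have h1 : y ∈ vals.filter (fun it => pvCatIndex (pvItemGet it "source_type") == c) :=
    (PySem.List.sorted2_perm _ _ _ _).mem_iff.1 h
  have h2 := (List.mem_filter.1 h1).2
  simpa [pvIdx, pvSt] using h2

lemma sorted_eq_flat (vals : List (List (String × String))) :
    PySem.List.sorted vals pvKeyA = ([0, 1, 2, 3, 4, 5] : List Int).flatMap (pvF vals) := by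
  induction vals using List.reverseRecOn with
  | nil => rfl
  | append_singleton vs v ih =>
      rw [sorted_append_singleton, ih]
      have hlt : (fun a b => decide (pvKeyA a < pvKeyA b)) = pvLtA := rfl
      rw [hlt]
      have hbound := (pvCat_spec (pvSt v)).1
      rw [insertBy_flatMap v _ (pvF vs) (fun c _ y hy => mem_pvF hy) (by decide)
        (by simp only [List.mem_cons, List.not_mem_nil, or_false, pvIdx]; omega)]
      apply flatMap_congr_mem
      intro c _
      rw [pvF_append]

-- ===== VERDICT (by name: the statement is the Claim_ definition above) =====
theorem normalize_negotiation_evidence_links_py_spec : Claim_equal_normalize_negotiation_evidence_links_py := by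
  intro raw_links _
  unfold Spec_normalize_negotiation_evidence_links_py
  simp only [normalize_negotiation_evidence_links_py, normalize_negotiation_evidence_links_py_alt]
  have hr : PySem.List.pyRange 0 ((pvCats.length : Int) + 1) 1 = [0, 1, 2, 3, 4, 5] := by decide
  rw [hr, PySem.List.foldl_append_eq_flatMap, List.nil_append]
  have key : PySem.List.sorted (pvDedup raw_links).values pvKeyA
      = ([0, 1, 2, 3, 4, 5] : List Int).flatMap
          (fun ci => PySem.List.sorted2
            ((pvDedup raw_links).values.filter
              (fun it => pvCatIndex (pvItemGet it "source_type") == ci))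
            (fun it => (pvItemGet it "source_id").toList)
            (fun it => (pvItemGet it "detail").toList)) :=
    sorted_eq_flat (pvDedup raw_links).values
  rw [key]
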